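-- pv_equiv track=rewrite | github.com/D4RKGEEK/a2z_scrapper | data.py | extract_app_details
-- ===== SOURCE A (Python) =====
-- def extract_app_details(s):
--     title = ''
--     version = ''
--     feature = ''
--     words = s.split()
--     for word in words:
--         if word.startswith('v') and len(word) >= 2 and word[1].isdigit():
--             version = word
--         elif (word.startswith('[') and word.endswith(']')) or (word.startswith('(') and word.endswith(')')):
--             feature = word[1:-1]
--         else:
--             if title:
--                 title += ' '
--             title += word
--     title = title.strip()
--     return version, feature
-- ===== SOURCE B (Python) =====
-- def extract_app_details(s):
--     words = s.split()
--     version = ''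
--     for word in reversed(words):
--         if word.startswith('v') and len(word) >= 2 and word[1].isdigit():
--             version = word
--             break
--     feature = ''
--     for word in reversed(words):
--         if (word.startswith('[') and word.endswith(']')) or (word.startswith('(') and word.endswith(')')):
--             feature = word[1:-1]
--             break
--     return version, feature
-- ===== Notes on version B (the rewrite author's own statement) =====
-- stated objective: simpler
-- what changed: Drops the unused title accumulator and replaces the single forward classify-all fold with two independent reverse scans that break at the first (= last) matching word, computing version and feature separately.
import Mathlib
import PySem

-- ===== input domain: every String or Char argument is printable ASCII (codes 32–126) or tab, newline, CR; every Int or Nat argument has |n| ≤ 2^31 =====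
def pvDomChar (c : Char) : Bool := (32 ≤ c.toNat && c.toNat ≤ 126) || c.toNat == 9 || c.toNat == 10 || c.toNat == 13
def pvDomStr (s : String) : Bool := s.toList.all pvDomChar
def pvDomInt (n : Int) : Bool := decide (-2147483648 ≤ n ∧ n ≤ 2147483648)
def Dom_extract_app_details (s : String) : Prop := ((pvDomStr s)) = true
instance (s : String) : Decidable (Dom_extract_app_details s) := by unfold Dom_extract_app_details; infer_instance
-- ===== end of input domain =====

-- B drops the unused title accumulator and does two reverse scans with early break instead of
-- A's single forward classify-all fold; objective: simpler. (Equal return value; no side effects.)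

-- ===== PORT A =====
def extract_app_details (s : String) : String × String :=
  let words := PySem.Str.split₀ s
  let r : String × String × String := words.foldl (fun st word =>
    if PySem.Str.startswith word "v" && decide (2 ≤ PySem.Str.len word) &&
       ((PySem.Str.pyGet? word 1).map PySem.Chars.isdigit).getD false then
      (st.1, word, st.2.2)
    else if (PySem.Str.startswith word "[" && PySem.Str.endswith word "]") ||
            (PySem.Str.startswith word "(" && PySem.Str.endswith word ")") then
      (st.1, st.2.1, PySem.Str.slice word (some 1) (some (-1)))
    else
      ((if st.1 ≠ "" then st.1 ++ " " else st.1) ++ word, st.2.1, st.2.2))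
    ("", "", "")
  let _title := PySem.Str.strip r.1   -- computed and discarded, as in A
  (r.2.1, r.2.2)

-- ===== PORT B =====
def pvIsVer (word : String) : Bool :=
  PySem.Str.startswith word "v" && decide (2 ≤ PySem.Str.len word) &&
    ((PySem.Str.pyGet? word 1).map PySem.Chars.isdigit).getD false

def pvIsFeat (word : String) : Bool :=
  (PySem.Str.startswith word "[" && PySem.Str.endswith word "]") ||
  (PySem.Str.startswith word "(" && PySem.Str.endswith word ")")

def extract_app_details_alt (s : String) : String × String :=
  let words := PySem.Str.split₀ s
  let version := (words.reverse.find? pvIsVer).getD ""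
  let feature := match words.reverse.find? pvIsFeat with
    | some w => PySem.Str.slice w (some 1) (some (-1))
    | none => ""
  (version, feature)

-- ===== PRECONDITION & SPEC =====
def Spec_extract_app_details (s : String) (out : String × String) : Prop := out = extract_app_details_alt s
instance (s : String) (out : String × String) : Decidable (Spec_extract_app_details s out) := by unfold Spec_extract_app_details; infer_instance

-- ===== CLAIM (what is proved, stated in full; the proofs are below) =====
def Claim_equal_extract_app_details : Prop := ∀ (s : String), Dom_extract_app_details s → Spec_extract_app_details s (extract_app_details s)

-- ===== LEMMAS AND PROOFS =====

-- A word starting with 'v' cannot start with '[' or '('.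
lemma pvDisj (w : String) (h : pvIsVer w = true) : pvIsFeat w = false := by
  unfold pvIsVer at h
  unfold pvIsFeat
  simp only [Bool.and_eq_true] at h
  obtain ⟨⟨hv, -⟩, -⟩ := h
  simp only [PySem.Str.startswith_eq] at hv ⊢
  cases hl : w.toList with
  | nil => rw [hl] at hv; simp [PySem.Chars.startswith] at hv
  | cons c cs =>
    rw [hl] at hv
    have e1 : "v".toList = ['v'] := rfl
    have e2 : "[".toList = ['['] := rfl
    have e3 : "(".toList = ['('] := rfl
    simp only [PySem.Chars.startswith, List.isPrefixOf_iff_prefix, e1, e2, e3,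
      List.cons_prefix_cons] at hv ⊢
    obtain ⟨hc, -⟩ := hv
    subst hc
    simp

def pvStep (st : String × String × String) (word : String) : String × String × String :=
  if pvIsVer word then (st.1, word, st.2.2)
  else if pvIsFeat word then (st.1, st.2.1, PySem.Str.slice word (some 1) (some (-1)))
  else ((if st.1 ≠ "" then st.1 ++ " " else st.1) ++ word, st.2.1, st.2.2)

lemma pvFold_ver (ws : List String) : ∀ st : String × String × String,
    (ws.foldl pvStep st).2.1 = (ws.reverse.find? pvIsVer).getD st.2.1 := by
  induction ws with
  | nil => intro st; simp
  | cons w ws ih =>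
    intro st
    rw [List.foldl_cons, ih, List.reverse_cons, List.find?_append]
    cases hf : ws.reverse.find? pvIsVer with
    | some x => simp
    | none =>
      unfold pvStep
      by_cases hv : pvIsVer w <;> by_cases hft : pvIsFeat w <;>
        simp [hv, hft, List.find?]

lemma pvFold_feat (ws : List String) : ∀ st : String × String × String,
    (ws.foldl pvStep st).2.2 =
      match ws.reverse.find? pvIsFeat with
      | some w => PySem.Str.slice w (some 1) (some (-1))
      | none => st.2.2 := by
  induction ws with
  | nil => intro st; simp
  | cons w ws ih =>
    intro st
    rw [List.foldl_cons, ih, List.reverse_cons, List.find?_append]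
    cases hf : ws.reverse.find? pvIsFeat with
    | some x => simp
    | none =>
      unfold pvStep
      by_cases hv : pvIsVer w
      · have := pvDisj w hv
        simp [hv, this, List.find?]
      · by_cases hft : pvIsFeat w <;> simp [hv, hft, List.find?]

-- ===== VERDICT (by name: the statement is the Claim_ definition above) =====
theorem extract_app_details_spec : Claim_equal_extract_app_details := by
  intro s _
  unfold Spec_extract_app_details extract_app_details extract_app_details_alt
  have hstep : (fun (st : String × String × String) word =>
      if PySem.Str.startswith word "v" && decide (2 ≤ PySem.Str.len word) &&
         ((PySem.Str.pyGet? word 1).map PySem.Chars.isdigit).getD false then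
        (st.1, word, st.2.2)
      else if (PySem.Str.startswith word "[" && PySem.Str.endswith word "]") ||
              (PySem.Str.startswith word "(" && PySem.Str.endswith word ")") then
        (st.1, st.2.1, PySem.Str.slice word (some 1) (some (-1)))
      else ((if st.1 ≠ "" then st.1 ++ " " else st.1) ++ word, st.2.1, st.2.2)) = pvStep := by
    funext st word; simp [pvStep, pvIsVer, pvIsFeat]
  simp only [hstep]
  rw [pvFold_ver, pvFold_feat]
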